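-- pv_equiv track=rewrite | github.com/bcsnpc/semantic-test | src/semantic_test/core/graph/queries.py | downstream_by_type
-- ===== SOURCE A (Python) =====
-- def downstream(node_id: str, reverse_adj: dict[str, set[str]]) -> set[str]:
--     """Return transitive downstream dependents for ``node_id``."""
--     return _walk(reverse_adj, node_id)
--
-- def downstream_by_type(
--     node_id: str,
--     reverse_adj: dict[str, set[str]],
--     node_types: dict[str, str],
-- ) -> dict[str, int]:
--     """Return downstream dependent counts grouped by object type."""
--     counts: dict[str, int] = {}
--     for dependent_id in downstream(node_id, reverse_adj):
--         object_type = node_types.get(dependent_id, "Unknown")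
--         counts[object_type] = counts.get(object_type, 0) + 1
--     return counts
--
-- def _walk(adjacency: dict[str, set[str]], start: str) -> set[str]:
--     visited: set[str] = set()
--     stack = list(adjacency.get(start, set()))
--     while stack:
--         node = stack.pop()
--         if node in visited:
--             continue
--         visited.add(node)
--         stack.extend(adjacency.get(node, set()) - visited)
--     return visited
-- ===== SOURCE B (Python) =====
-- def downstream_by_type(node_id, reverse_adj, node_types):
--     """Recursion-emulating DFS over a stack of pending-children frames,
--     counting dependents by type the moment each node is first reached."""
--     counts = {}
--     visited = set()
--     frames = [list(reverse_adj.get(node_id, set()))]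
--     while frames:
--         frame = frames[-1]
--         if not frame:
--             frames.pop()
--             continue
--         node = frame.pop()
--         if node in visited:
--             continue
--         visited.add(node)
--         object_type = node_types.get(node, "Unknown")
--         counts[object_type] = counts.get(object_type, 0) + 1
--         frames.append(list(reverse_adj.get(node, set()) - visited))
--     return counts
-- ===== Notes on version B (the rewrite author's own statement) =====
-- stated objective: alternative
-- what changed: B replaces A's three-function collect-then-group pipeline (flat worklist DFS that merges all pending children into one stack and materializes the full downstream set, then a separate grouping pass) with a single recursion-emulating loop over a stack of per-node pending-children frames that counts each node's type at first reach, never building the downstream set.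
import Mathlib
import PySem

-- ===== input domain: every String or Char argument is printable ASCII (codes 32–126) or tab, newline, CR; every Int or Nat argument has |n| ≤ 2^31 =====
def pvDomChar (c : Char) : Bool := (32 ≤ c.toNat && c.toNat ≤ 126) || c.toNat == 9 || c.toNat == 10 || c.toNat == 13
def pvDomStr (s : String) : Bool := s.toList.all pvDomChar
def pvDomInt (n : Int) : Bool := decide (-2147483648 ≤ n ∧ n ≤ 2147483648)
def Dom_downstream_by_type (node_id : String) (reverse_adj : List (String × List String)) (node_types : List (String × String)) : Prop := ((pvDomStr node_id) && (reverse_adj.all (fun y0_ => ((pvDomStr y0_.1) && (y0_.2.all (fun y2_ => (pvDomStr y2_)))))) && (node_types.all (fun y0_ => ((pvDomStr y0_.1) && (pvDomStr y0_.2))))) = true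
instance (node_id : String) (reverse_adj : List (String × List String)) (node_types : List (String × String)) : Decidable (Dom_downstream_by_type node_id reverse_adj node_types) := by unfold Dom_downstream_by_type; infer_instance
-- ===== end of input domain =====

-- B replaces A's collect-then-group pipeline (flat worklist DFS building the whole
-- downstream set, then a grouping pass) by a recursion-emulating stack of
-- pending-children frames that counts types at first reach; objective: alternative.

-- ===== PORT A =====
-- _walk's while loop, ported with fuel (an upper bound on the number of pops,
-- computed below); stack.pop() pops the last element.
def pvWalkLoop (adj : PySem.Dict String (List String)) :
    Nat → List String → PySem.Set String → PySem.Set String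
  | 0, _, visited => visited
  | fuel+1, stack, visited =>
    match stack.getLast? with
    | none => visited
    | some node =>
      let stack' := stack.dropLast
      if PySem.Set.contains visited node then
        pvWalkLoop adj fuel stack' visited
      else
        let visited' := PySem.Set.add visited node
        pvWalkLoop adj fuel
          (stack' ++ PySem.Set.diff (PySem.Set.ofList (adj.getD node [])) visited')
          visited'

def downstream_by_type (node_id : String) (reverse_adj : List (String × List String)) (node_types : List (String × String)) : List (String × Int) :=
  let adj := PySem.Dict.mk reverse_adj
  let nts := PySem.Dict.mk node_types
  let stack0 : List String := PySem.Set.ofList (adj.getD node_id [])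
  let fuel := stack0.length + (reverse_adj.map (fun p => p.2.length)).sum + 1
  let visited := pvWalkLoop adj fuel stack0 PySem.Set.empty
  -- downstream_by_type's counting loop over the downstream set
  (visited.foldl (fun c n =>
      let t := nts.getD n "Unknown"
      c.insert t (c.getD t 0 + 1)) PySem.Dict.empty).items

-- ===== PORT B =====
-- Source B's while loop over `frames`, a stack of pending-children lists (head = the
-- Python frames[-1]); fuel bounds the element pops only (popping an exhausted
-- frame shrinks `frames` at constant fuel), a pure totality device.
def pvFrameLoop (adj : PySem.Dict String (List String)) (nts : PySem.Dict String String) :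
    Nat → List (List String) → PySem.Set String → PySem.Dict String Int → PySem.Dict String Int
  | 0, _, _, counts => counts
  | _+1, [], _, counts => counts
  | fuel+1, frame :: rest, visited, counts =>
    match frame.getLast? with
    | none => pvFrameLoop adj nts (fuel+1) rest visited counts
    | some node =>
      let frame' := frame.dropLast
      if PySem.Set.contains visited node then
        pvFrameLoop adj nts fuel (frame' :: rest) visited counts
      else
        let visited' := PySem.Set.add visited node
        let t := nts.getD node "Unknown"
        pvFrameLoop adj nts fuel
          (PySem.Set.diff (PySem.Set.ofList (adj.getD node [])) visited' :: frame' :: rest)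
          visited' (counts.insert t (counts.getD t 0 + 1))
  termination_by fuel frames _ _ => (fuel, frames.length)

def downstream_by_type_alt (node_id : String) (reverse_adj : List (String × List String)) (node_types : List (String × String)) : List (String × Int) :=
  let adj := PySem.Dict.mk reverse_adj
  let nts := PySem.Dict.mk node_types
  let frame0 : List String := PySem.Set.ofList (adj.getD node_id [])
  let fuel := frame0.length + (reverse_adj.map (fun p => p.2.length)).sum + 1
  (pvFrameLoop adj nts fuel [frame0] PySem.Set.empty PySem.Dict.empty).items

-- ===== PRECONDITION & SPEC =====
def Spec_downstream_by_type (node_id : String) (reverse_adj : List (String × List String)) (node_types : List (String × String)) (out : List (String × Int)) : Prop := out = downstream_by_type_alt node_id reverse_adj node_types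
instance (node_id : String) (reverse_adj : List (String × List String)) (node_types : List (String × String)) (out : List (String × Int)) : Decidable (Spec_downstream_by_type node_id reverse_adj node_types out) := by unfold Spec_downstream_by_type; infer_instance

-- ===== CLAIM (what is proved, stated in full; the proofs are below) =====
def Claim_equal_downstream_by_type : Prop := ∀ (node_id : String) (reverse_adj : List (String × List String)) (node_types : List (String × String)), Dom_downstream_by_type node_id reverse_adj node_types → Spec_downstream_by_type node_id reverse_adj node_types (downstream_by_type node_id reverse_adj node_types)

-- ===== LEMMAS AND PROOFS =====

-- proof-side middle form: A's flat DFS with the counting fused into it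
def pvFusedLoop (adj : PySem.Dict String (List String)) (nts : PySem.Dict String String) :
    Nat → List String → PySem.Set String → PySem.Dict String Int → PySem.Dict String Int
  | 0, _, _, counts => counts
  | fuel+1, stack, visited, counts =>
    match stack.getLast? with
    | none => counts
    | some node =>
      let stack' := stack.dropLast
      if PySem.Set.contains visited node then
        pvFusedLoop adj nts fuel stack' visited counts
      else
        let visited' := PySem.Set.add visited node
        let t := nts.getD node "Unknown"
        pvFusedLoop adj nts fuel
          (stack' ++ PySem.Set.diff (PySem.Set.ofList (adj.getD node [])) visited')
          visited'
          (counts.insert t (counts.getD t 0 + 1))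

-- the visited list only grows (by appending) through the walk loop
theorem pvWalkLoop_prefix (adj : PySem.Dict String (List String)) :
    ∀ (fuel : Nat) (stack : List String) (visited : PySem.Set String),
      visited <+: pvWalkLoop adj fuel stack visited := by
  intro fuel
  induction fuel with
  | zero => intro stack visited; simp [pvWalkLoop]
  | succ f ih =>
    intro stack visited
    rw [pvWalkLoop]
    cases h : stack.getLast? with
    | none => exact List.prefix_refl _
    | some node =>
      cases hv : PySem.Set.contains visited node with
      | true => simpa only [hv, if_true] using ih _ visited
      | false =>
        have hnm : node ∉ visited := by simpa using hv
        simp only [hv, Bool.false_eq_true, if_false, PySem.Set.add_of_not_mem hnm]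
        exact (List.prefix_append visited [node]).trans (ih _ _)

-- the fused flat loop computes exactly A's counting fold over the nodes the walk
-- loop newly visits, in the same order
theorem pvFused_eq_walk (adj : PySem.Dict String (List String)) (nts : PySem.Dict String String) :
    ∀ (fuel : Nat) (stack : List String) (visited : PySem.Set String)
      (counts : PySem.Dict String Int),
      pvFusedLoop adj nts fuel stack visited counts =
        ((pvWalkLoop adj fuel stack visited).drop visited.length).foldl
          (fun c n => c.insert (nts.getD n "Unknown") (c.getD (nts.getD n "Unknown") 0 + 1)) counts := by
  intro fuel
  induction fuel with
  | zero => intro stack visited counts; simp [pvFusedLoop, pvWalkLoop]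
  | succ f ih =>
    intro stack visited counts
    rw [pvFusedLoop, pvWalkLoop]
    cases h : stack.getLast? with
    | none => simp
    | some node =>
      cases hv : PySem.Set.contains visited node with
      | true => simpa only [hv, if_true] using ih _ visited counts
      | false =>
        have hnm : node ∉ visited := by simpa using hv
        simp only [hv, Bool.false_eq_true, if_false]
        rw [ih]
        obtain ⟨r, hr⟩ := pvWalkLoop_prefix adj f
          (stack.dropLast ++ PySem.Set.diff (PySem.Set.ofList (adj.getD node [])) (PySem.Set.add visited node))
          (PySem.Set.add visited node)
        rw [← hr, PySem.Set.add_of_not_mem hnm, List.drop_left,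
          show visited ++ [node] ++ r = visited ++ ([node] ++ r) from List.append_assoc .. ,
          List.drop_left]
        rfl

-- B's frame-stack loop runs the flat fused loop on the bottom-to-top
-- concatenation of its frames, fuel-synchronously (element pops only)
theorem pvFrame_eq_fused (adj : PySem.Dict String (List String)) (nts : PySem.Dict String String) :
    ∀ (fuel : Nat) (frames : List (List String)) (visited : PySem.Set String)
      (counts : PySem.Dict String Int),
      pvFrameLoop adj nts fuel frames visited counts =
        pvFusedLoop adj nts fuel frames.reverse.flatten visited counts := by
  intro fuel
  induction fuel with
  | zero => intro frames visited counts; simp [pvFrameLoop, pvFusedLoop]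
  | succ f ihf =>
    intro frames
    induction frames with
    | nil => intro visited counts; simp [pvFrameLoop, pvFusedLoop]
    | cons frame rest ihr =>
      intro visited counts
      have hflat : (frame :: rest).reverse.flatten = rest.reverse.flatten ++ frame := by
        simp
      rw [pvFrameLoop, hflat]
      cases h : frame.getLast? with
      | none =>
        have hfe : frame = [] := by simpa using h
        rw [ihr, hfe, List.append_nil]
      | some node =>
        have hne : frame ≠ [] := by
          intro hc; rw [hc] at h; simp at h
        rw [pvFusedLoop]
        have hlast : (rest.reverse.flatten ++ frame).getLast? = some node := by
          rw [List.getLast?_append_of_ne_nil _ hne, h]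
        rw [hlast]
        have hdrop : (rest.reverse.flatten ++ frame).dropLast = rest.reverse.flatten ++ frame.dropLast :=
          List.dropLast_append_of_ne_nil hne
        cases hv : PySem.Set.contains visited node with
        | true =>
          simp only [hv, if_true, hdrop]
          rw [ihf]
          simp
        | false =>
          simp only [hv, Bool.false_eq_true, if_false, hdrop]
          rw [ihf]
          simp [List.append_assoc]

-- ===== VERDICT (by name: the statement is the Claim_ definition above) =====
theorem downstream_by_type_spec : Claim_equal_downstream_by_type := by
  intro node_id reverse_adj node_types _
  unfold Spec_downstream_by_type
  simp only [downstream_by_type, downstream_by_type_alt]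
  rw [pvFrame_eq_fused, pvFused_eq_walk]
  simp [PySem.Set.empty]
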